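-- pv_equiv track=rewrite | github.com/gridvisi/Python_workspace | 2 Project_base_learning/Minecraft/6 kyu [Minecraft Series #1] Steve wants to build a beacon pyramid.py | blocks_to_collect
-- ===== SOURCE A (Python) =====
-- def blocks_to_collect(level):
--     #raw = {'gold': 0, 'diamond': 0, 'emerald': 0, 'iron': 0}
--     result = {}
--     raw = ['gold', 'diamond', 'emerald', 'iron']
--     re = [0]*len(raw)
--     for i in range(level):
--         re[i%len(raw)] += (2*(i//len(raw))*len(raw)+3 + (i%len(raw))*2)**2
--     result['total'] = sum([i for i in re])
--     res = dict(zip(raw,[i for i in re]))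
--     out = dict(result,**res)
--     return out
-- ===== SOURCE B (Python) =====
-- def _residue_sum(level, r):
--     # number of pyramid layers i < level with i % 4 == r; each contributes (8*j + 2*r + 3)**2 for j = 0..m-1
--     m = (level - r + 3) // 4
--     if m < 0:
--         m = 0
--     c = 2 * r + 3
--     return 64 * (m - 1) * m * (2 * m - 1) // 6 + 16 * c * (m * (m - 1) // 2) + c * c * m
--
-- def blocks_to_collect(level):
--     g = _residue_sum(level, 0)
--     d = _residue_sum(level, 1)
--     e = _residue_sum(level, 2)
--     i = _residue_sum(level, 3)
--     return {'total': g + d + e + i, 'gold': g, 'diamond': d, 'emerald': e, 'iron': i}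
-- ===== Notes on version B (the rewrite author's own statement) =====
-- stated objective: faster
-- what changed: Replaces A's per-layer loop (one squared term added per pyramid level) with a closed-form sum-of-squares formula evaluated once per residue class, so B does O(1) arithmetic instead of O(level) iterations.
import Mathlib
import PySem

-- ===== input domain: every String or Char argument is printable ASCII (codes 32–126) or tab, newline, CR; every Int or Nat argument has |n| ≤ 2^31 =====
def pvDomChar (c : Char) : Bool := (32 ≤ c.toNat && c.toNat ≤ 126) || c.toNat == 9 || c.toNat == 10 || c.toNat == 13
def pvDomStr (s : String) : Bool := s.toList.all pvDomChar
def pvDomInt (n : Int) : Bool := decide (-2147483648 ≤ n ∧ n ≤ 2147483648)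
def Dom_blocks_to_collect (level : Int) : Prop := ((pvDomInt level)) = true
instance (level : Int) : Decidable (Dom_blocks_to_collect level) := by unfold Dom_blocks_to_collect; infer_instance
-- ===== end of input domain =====

-- B replaces A's per-level accumulation loop with a closed-form sum-of-squares formula per residue class (a different algorithm; a timing run measures the speed label).

-- ===== PORT A =====
-- the body of A's for-loop: re[i % len(raw)] += (2*(i//len(raw))*len(raw)+3 + (i%len(raw))*2)**2, with len(raw) = 4
def pvStepA (re : List Int) (i : Int) : List Int :=
  let idx := PySem.Int.mod i 4
  PySem.List.pySetD re idx
    (PySem.List.pyGetD re idx 0 +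
      (2 * PySem.Int.floordiv i 4 * 4 + 3 + idx * 2) ^ 2)

def blocks_to_collect (level : Int) : List (String × Int) :=
  let result : PySem.Dict String Int := PySem.Dict.empty
  let raw : List String := ["gold", "diamond", "emerald", "iron"]
  let re : List Int := List.replicate raw.length 0
  let re := (PySem.List.pyRange 0 level 1).foldl pvStepA re
  let result := result.insert "total" re.sum
  let res : PySem.Dict String Int := PySem.Dict.ofList (raw.zip re)
  let out := res.items.foldl (fun d kv => d.insert kv.1 kv.2) result
  out.items

-- ===== PORT B =====
-- closed form: the layers i < level with i % 4 == r contribute (8*j + 2*r + 3)^2 for j = 0 .. m-1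
def pvResidueSum (level r : Int) : Int :=
  let m0 := PySem.Int.floordiv (level - r + 3) 4
  let m := if m0 < 0 then 0 else m0
  let c := 2 * r + 3
  PySem.Int.floordiv (64 * (m - 1) * m * (2 * m - 1)) 6 +
    16 * c * PySem.Int.floordiv (m * (m - 1)) 2 + c * c * m

def blocks_to_collect_alt (level : Int) : List (String × Int) :=
  let g := pvResidueSum level 0
  let d := pvResidueSum level 1
  let e := pvResidueSum level 2
  let i := pvResidueSum level 3
  [("total", g + d + e + i), ("gold", g), ("diamond", d), ("emerald", e), ("iron", i)]

-- ===== PRECONDITION & SPEC =====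
def Spec_blocks_to_collect (level : Int) (out : List (String × Int)) : Prop := out = blocks_to_collect_alt level
instance (level : Int) (out : List (String × Int)) : Decidable (Spec_blocks_to_collect level out) := by unfold Spec_blocks_to_collect; infer_instance

-- ===== CLAIM (what is proved, stated in full; the proofs are below) =====
def Claim_equal_blocks_to_collect : Prop := ∀ (level : Int), Dom_blocks_to_collect level → Spec_blocks_to_collect level (blocks_to_collect level)

-- ===== LEMMAS AND PROOFS =====

theorem pv_six_dvd (m : Int) : (6 : Int) ∣ 64 * (m - 1) * m * (2 * m - 1) := by
  have h : ∀ a : ZMod 6, 64 * (a - 1) * a * (2 * a - 1) = 0 := by decide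
  have h2 : ((64 * (m - 1) * m * (2 * m - 1) : Int) : ZMod 6) = 0 := by push_cast; exact h m
  exact_mod_cast (ZMod.intCast_zmod_eq_zero_iff_dvd _ 6).mp h2

theorem pv_two_dvd (m : Int) : (2 : Int) ∣ m * (m - 1) := by
  have h : ∀ a : ZMod 2, a * (a - 1) = 0 := by decide
  have h2 : ((m * (m - 1) : Int) : ZMod 2) = 0 := by push_cast; exact h m
  exact_mod_cast (ZMod.intCast_zmod_eq_zero_iff_dvd _ 2).mp h2

-- one more layer: residue class r ∈ {0,1,2,3} gains (2n+3)^2 exactly when n % 4 = r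
theorem pvResidueSum_step (n : Nat) (r : Int) (hr0 : 0 ≤ r) (hr3 : r ≤ 3) :
    pvResidueSum ((n : Int) + 1) r =
      pvResidueSum (n : Int) r +
        (if PySem.Int.mod (n : Int) 4 = r then (2 * (n : Int) + 3) ^ 2 else 0) := by
  unfold pvResidueSum
  simp only [PySem.Int.mod_eq_emod_of_pos (show (0:Int) < 4 by norm_num),
             PySem.Int.floordiv_eq_ediv_of_pos (show (0:Int) < 4 by norm_num),
             PySem.Int.floordiv_eq_ediv_of_pos (show (0:Int) < 6 by norm_num),
             PySem.Int.floordiv_eq_ediv_of_pos (show (0:Int) < 2 by norm_num)]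
  set m := ((n : Int) - r + 3) / 4 with hm
  set m' := ((n : Int) + 1 - r + 3) / 4 with hm'
  have hmnn : 0 ≤ m := by rw [hm]; exact Int.ediv_nonneg (by omega) (by omega)
  have hmnn' : 0 ≤ m' := by rw [hm']; exact Int.ediv_nonneg (by omega) (by omega)
  rw [if_neg (by omega), if_neg (by omega)]
  obtain ⟨k, hk⟩ := pv_six_dvd m
  obtain ⟨j, hj⟩ := pv_two_dvd m
  obtain ⟨k', hk'⟩ := pv_six_dvd m'
  obtain ⟨j', hj'⟩ := pv_two_dvd m'
  rw [hk, hk', hj, hj',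
      Int.mul_ediv_cancel_left _ (by norm_num : (6:Int) ≠ 0),
      Int.mul_ediv_cancel_left _ (by norm_num : (6:Int) ≠ 0),
      Int.mul_ediv_cancel_left _ (by norm_num : (2:Int) ≠ 0),
      Int.mul_ediv_cancel_left _ (by norm_num : (2:Int) ≠ 0)]
  by_cases hcase : (n : Int) % 4 = r
  · rw [if_pos hcase]
    have h1 : m' = m + 1 := by omega
    have h2 : (n : Int) = 4 * m + r := by omega
    have hk3 : k' = k + 64 * m ^ 2 :=
      mul_left_cancel₀ (by norm_num : (6:Int) ≠ 0) (by rw [← hk', h1]; linear_combination hk)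
    have hj3 : j' = j + m :=
      mul_left_cancel₀ (by norm_num : (2:Int) ≠ 0) (by rw [← hj', h1]; linear_combination hj)
    rw [hk3, hj3, h2, h1]; ring
  · rw [if_neg hcase]
    have h1 : m' = m := by omega
    have hk3 : k' = k :=
      mul_left_cancel₀ (by norm_num : (6:Int) ≠ 0) (by rw [← hk', h1, hk])
    have hj3 : j' = j :=
      mul_left_cancel₀ (by norm_num : (2:Int) ≠ 0) (by rw [← hj', h1, hj])
    rw [hk3, hj3, h1]; ring

-- A's read-modify-write on the 4-slot accumulator, one equation per slot
theorem pvSetGet (x0 x1 x2 x3 v : Int) :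
    PySem.List.pySetD [x0,x1,x2,x3] 0 v = [v,x1,x2,x3] ∧
    PySem.List.pySetD [x0,x1,x2,x3] 1 v = [x0,v,x2,x3] ∧
    PySem.List.pySetD [x0,x1,x2,x3] 2 v = [x0,x1,v,x3] ∧
    PySem.List.pySetD [x0,x1,x2,x3] 3 v = [x0,x1,x2,v] ∧
    PySem.List.pyGetD [x0,x1,x2,x3] 0 0 = x0 ∧
    PySem.List.pyGetD [x0,x1,x2,x3] 1 0 = x1 ∧
    PySem.List.pyGetD [x0,x1,x2,x3] 2 0 = x2 ∧
    PySem.List.pyGetD [x0,x1,x2,x3] 3 0 = x3 :=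
  ⟨rfl, rfl, rfl, rfl, rfl, rfl, rfl, rfl⟩

-- A's accumulator after n layers is exactly B's four closed forms
theorem pv_fold_eq (n : Nat) :
    (PySem.List.pyRange 0 (n : Int) 1).foldl pvStepA [0, 0, 0, 0] =
      [pvResidueSum (n : Int) 0, pvResidueSum (n : Int) 1,
       pvResidueSum (n : Int) 2, pvResidueSum (n : Int) 3] := by
  induction n with
  | zero => decide
  | succ n ih =>
    have hmod : PySem.Int.mod (n : Int) 4 = ((n % 4 : Nat) : Int) := by
      exact_mod_cast PySem.Int.mod_natCast n 4
    have hdiv : PySem.Int.floordiv (n : Int) 4 = ((n / 4 : Nat) : Int) := by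
      exact_mod_cast PySem.Int.floordiv_natCast n 4
    have hval : 2 * ((n / 4 : Nat) : Int) * 4 + 3 + ((n % 4 : Nat) : Int) * 2
        = 2 * (n : Int) + 3 := by push_cast; omega
    have hr : PySem.List.pyRange 0 ((n : Int) + 1) 1 =
        PySem.List.pyRange 0 (n : Int) 1 ++ [(n : Int)] := by
      exact PySem.List.pyRange_one_succ_right (by positivity)
    push_cast
    rw [hr, List.foldl_append, ih, List.foldl_cons, List.foldl_nil]
    unfold pvStepA
    simp only []
    rw [hmod, hdiv, hval,
        pvResidueSum_step n 0 (by norm_num) (by norm_num),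
        pvResidueSum_step n 1 (by norm_num) (by norm_num),
        pvResidueSum_step n 2 (by norm_num) (by norm_num),
        pvResidueSum_step n 3 (by norm_num) (by norm_num),
        hmod]
    have h4 : n % 4 = 0 ∨ n % 4 = 1 ∨ n % 4 = 2 ∨ n % 4 = 3 := by omega
    rcases h4 with h | h | h | h <;> rw [h] <;>
      simp [(pvSetGet _ _ _ _ _).1, (pvSetGet _ _ _ _ _).2.1,
            (pvSetGet _ _ _ _ _).2.2.1, (pvSetGet _ _ _ _ _).2.2.2.1] <;> rfl

-- for level ≤ 0 every residue class is empty, so each closed form is 0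
theorem pvResidueSum_nonpos (level r : Int) (hl : level ≤ 0) (hr0 : 0 ≤ r) (hr3 : r ≤ 3) :
    pvResidueSum level r = 0 := by
  unfold pvResidueSum
  simp only [PySem.Int.floordiv_eq_ediv_of_pos (show (0:Int) < 4 by norm_num)]
  set m0 := (level - r + 3) / 4 with hm0
  have h : m0 ≤ 0 := by omega
  rcases lt_or_eq_of_le h with h' | h'
  · rw [if_pos h']
    norm_num [show PySem.Int.floordiv 0 6 = 0 from rfl, show PySem.Int.floordiv 0 2 = 0 from rfl]
  · rw [if_neg (by omega), h']
    norm_num [show PySem.Int.floordiv 0 6 = 0 from rfl, show PySem.Int.floordiv 0 2 = 0 from rfl]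

-- A's dict-building tail on the four computed residue totals
theorem pv_dict_tail (g0 g1 g2 g3 : Int) :
    (((PySem.Dict.ofList (List.zip ["gold", "diamond", "emerald", "iron"] [g0,g1,g2,g3])).items).foldl
        (fun d kv => d.insert kv.1 kv.2) ((PySem.Dict.empty : PySem.Dict String Int).insert "total" ([g0,g1,g2,g3].sum))).items
      = [("total", [g0,g1,g2,g3].sum), ("gold", g0), ("diamond", g1), ("emerald", g2), ("iron", g3)] := rfl

theorem pv_ports_eq (level : Int) : blocks_to_collect level = blocks_to_collect_alt level := by
  unfold blocks_to_collect blocks_to_collect_alt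
  simp only []
  cases level with
  | ofNat n =>
    rw [show ((Int.ofNat n) : Int) = (n : Int) from rfl]
    rw [show (List.replicate (["gold", "diamond", "emerald", "iron"] : List String).length (0:Int)) = [0,0,0,0] from rfl]
    rw [pv_fold_eq n, pv_dict_tail]
    simp only [List.sum_cons, List.sum_nil, List.cons.injEq, Prod.mk.injEq]
    exact ⟨⟨trivial, by ring⟩, trivial⟩
  | negSucc n =>
    have hneg : (Int.negSucc n) ≤ 0 := by omega
    rw [PySem.List.pyRange_one_eq_nil (by omega)]
    rw [pvResidueSum_nonpos _ 0 hneg (by norm_num) (by norm_num),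
        pvResidueSum_nonpos _ 1 hneg (by norm_num) (by norm_num),
        pvResidueSum_nonpos _ 2 hneg (by norm_num) (by norm_num),
        pvResidueSum_nonpos _ 3 hneg (by norm_num) (by norm_num)]
    rfl

-- ===== VERDICT (by name: the statement is the Claim_ definition above) =====
theorem blocks_to_collect_spec : Claim_equal_blocks_to_collect := by
  intro level _
  unfold Spec_blocks_to_collect
  exact pv_ports_eq level
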